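-- pv_equiv track=rewrite | github.com/brocade/ansible | utils/brocade_zoning.py | process_member_diff
-- ===== SOURCE A (Python) =====
-- def is_wwn(member):
--     octets = member.split(":")
--     if len(octets) == 8:
--         return True
--     else:
--         return False
--
-- def process_member_diff(result, members, current_members):
--     a_members = []
--     r_members = []
--     o_members = []
--
--     if isinstance(current_members, list):
--         c_members = current_members
--     else:
--         c_members = [current_members]
--
--     # find requested members that are not in the current
--     # members to see if any needs to be added
--     for member in members:
--         if is_wwn(member):
--             member = member.lower()
--
--         found = False
--         for c_member in c_members:
--             if member == c_member:
--                 found = True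
--                 continue
--         if found is False:
--             a_members.append(member)
--
--     # find current members that are not in the requested
--     # members to see if any needs to be removed
--     for c_member in c_members:
--         found = False
--         for member in members:
--             if is_wwn(member):
--                 member = member.lower()
--
--             if member == c_member:
--                 found = True
--                 continue
--         if found is False:
--             r_members.append(c_member)
--
--     # find requested members that are not in to-be-added
--     # members to see if any are overlap between requested
--     # and current
--     for member in members:
--         if is_wwn(member):
--             member = member.lower()
--
--         found = False
--         for a_member in a_members:
--             if member == a_member:
--                 found = True
--                 continue
--         if found is False:
--             o_members.append(member)
--
--     return a_members, r_members, o_members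
-- ===== SOURCE B (Python) =====
-- def is_wwn(member):
--     return len(member.split(":")) == 8
--
--
-- def process_member_diff(result, members, current_members):
--     c_members = current_members if isinstance(current_members, list) else [current_members]
--     norm = [m.lower() if is_wwn(m) else m for m in members]
--     cset = set(c_members)
--     a_members, o_members = [], []
--     for m in norm:
--         (o_members if m in cset else a_members).append(m)
--     nset = set(norm)
--     r_members = [c for c in c_members if c not in nset]
--     return a_members, r_members, o_members
-- ===== Notes on version B (the rewrite author's own statement) =====
-- stated objective: faster
-- what changed: B normalizes the requested members once, then one pass splits them into add/overlap by membership in a set of current members (instead of A's separate add pass plus a third pass that rescans a_members), and removals come from one filter against a set of the normalized requests, replacing A's three quadratic nested-loop passes.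
import Mathlib
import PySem

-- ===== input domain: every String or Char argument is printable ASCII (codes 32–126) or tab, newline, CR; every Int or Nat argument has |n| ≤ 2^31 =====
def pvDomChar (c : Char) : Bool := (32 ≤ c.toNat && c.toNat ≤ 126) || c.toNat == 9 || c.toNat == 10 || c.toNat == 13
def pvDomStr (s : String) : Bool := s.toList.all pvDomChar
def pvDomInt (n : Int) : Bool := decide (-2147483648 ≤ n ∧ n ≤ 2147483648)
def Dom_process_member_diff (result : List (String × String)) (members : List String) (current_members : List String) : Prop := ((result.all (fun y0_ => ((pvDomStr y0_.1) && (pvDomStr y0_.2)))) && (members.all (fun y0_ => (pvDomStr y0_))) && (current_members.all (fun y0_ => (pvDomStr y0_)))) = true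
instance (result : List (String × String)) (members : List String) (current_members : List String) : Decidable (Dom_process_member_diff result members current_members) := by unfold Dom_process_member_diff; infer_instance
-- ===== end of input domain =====

-- B merges A's add pass and A's third (overlap) pass into one membership-driven split
-- over the once-normalized requests, and uses sets for the scans; objective: simpler.

-- ===== PORT A =====

def is_wwn (member : String) : Bool :=
  if (PySem.Chars.splitOn member.toList [':']).length = 8 then true else false

-- ===== PORT B =====
def is_wwn_b (member : String) : Bool :=
  (PySem.Chars.splitOn member.toList [':']).length == 8

def process_member_diff (result : List (String × String)) (members : List String) (current_members : List String) : List String × List String × List String :=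
  let c_members := current_members
  let a_members := members.foldl (fun a_members member =>
    let member := if is_wwn member then PySem.Str.lower member else member
    let found := c_members.foldl (fun found c_member =>
      if member = c_member then true else found) false
    if found = false then a_members ++ [member] else a_members) []
  let r_members := c_members.foldl (fun r_members c_member =>
    let found := members.foldl (fun found member =>
      let member := if is_wwn member then PySem.Str.lower member else member
      if member = c_member then true else found) false
    if found = false then r_members ++ [c_member] else r_members) []
  let o_members := members.foldl (fun o_members member =>
    let member := if is_wwn member then PySem.Str.lower member else member
    let found := a_members.foldl (fun found a_member =>
      if member = a_member then true else found) false
    if found = false then o_members ++ [member] else o_members) []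
  (a_members, r_members, o_members)

def process_member_diff_alt (result : List (String × String)) (members : List String) (current_members : List String) : List String × List String × List String :=
  let c_members := current_members
  let norm := members.map (fun m => if is_wwn_b m then PySem.Str.lower m else m)
  let cset := PySem.Set.ofList c_members
  let p := norm.foldl (fun (p : List String × List String) m =>
    if PySem.Set.contains cset m then (p.1, p.2 ++ [m]) else (p.1 ++ [m], p.2)) ([], [])
  let nset := PySem.Set.ofList norm
  let r_members := c_members.filter (fun c => !(PySem.Set.contains nset c))
  (p.1, r_members, p.2)


-- ===== PRECONDITION & SPEC =====
def Spec_process_member_diff (result : List (String × String)) (members : List String) (current_members : List String) (out : List String × List String × List String) : Prop := out = process_member_diff_alt result members current_members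
instance (result : List (String × String)) (members : List String) (current_members : List String) (out : List String × List String × List String) : Decidable (Spec_process_member_diff result members current_members out) := by unfold Spec_process_member_diff; infer_instance

-- ===== CLAIM (what is proved, stated in full; the proofs are below) =====
def Claim_equal_process_member_diff : Prop := ∀ (result : List (String × String)) (members : List String) (current_members : List String), Dom_process_member_diff result members current_members → Spec_process_member_diff result members current_members (process_member_diff result members current_members)

-- ===== LEMMAS AND PROOFS =====

def pvNorm (m : String) : String := if is_wwn m then PySem.Str.lower m else m

theorem foldl_found (l : List String) (m : String) (b : Bool) :
    l.foldl (fun found c => if m = c then true else found) b = (b || l.contains m) := by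
  induction l generalizing b with
  | nil => simp
  | cons x xs ih =>
    simp only [List.foldl_cons, List.contains_cons, ih]
    by_cases h : m = x
    · simp [h]
    · have hb : (m == x) = false := beq_false_of_ne h
      simp [h, hb]

theorem foldl_pick (c : List String) (l : List String) (acc : List String) :
    l.foldl (fun a member =>
      let member := if is_wwn member then PySem.Str.lower member else member
      let found := c.foldl (fun found x => if member = x then true else found) false
      if found = false then a ++ [member] else a) acc
    = acc ++ (l.map pvNorm).filter (fun m => !(c.contains m)) := by
  induction l generalizing acc with
  | nil => simp
  | cons x xs ih =>
    rw [List.foldl_cons, ih]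
    show (if (c.foldl (fun found y => if pvNorm x = y then true else found) false) = false
          then acc ++ [pvNorm x] else acc) ++ _ = _
    rw [foldl_found]
    cases h : c.contains (pvNorm x) <;>
      simp only [List.map_cons, List.filter_cons, h] <;> simp

theorem foldl_found_norm (l : List String) (m : String) (b : Bool) :
    l.foldl (fun found mem => if pvNorm mem = m then true else found) b
      = (b || (l.map pvNorm).contains m) := by
  induction l generalizing b with
  | nil => simp
  | cons x xs ih =>
    rw [List.foldl_cons, ih]
    rw [List.map_cons, List.contains_cons]
    by_cases h : pvNorm x = m
    · simp [h]
    · have hb : (m == pvNorm x) = false := beq_false_of_ne (fun e => h e.symm)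
      simp [h, hb]

theorem foldl_remove (l : List String) (c : List String) (acc : List String) :
    c.foldl (fun r c_member =>
      let found := l.foldl (fun found member =>
        let member := if is_wwn member then PySem.Str.lower member else member
        if member = c_member then true else found) false
      if found = false then r ++ [c_member] else r) acc
    = acc ++ c.filter (fun x => !((l.map pvNorm).contains x)) := by
  induction c generalizing acc with
  | nil => simp
  | cons x xs ih =>
    rw [List.foldl_cons, ih]
    show (if (l.foldl (fun found mem => if pvNorm mem = x then true else found) false) = false
          then acc ++ [x] else acc) ++ _ = _
    rw [foldl_found_norm]
    cases h : (l.map pvNorm).contains x <;>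
      simp only [List.filter_cons, h] <;> simp

theorem foldl_pair (cset : PySem.Set String) (l : List String) (p : List String × List String) :
    l.foldl (fun (p : List String × List String) m =>
      if PySem.Set.contains cset m then (p.1, p.2 ++ [m]) else (p.1 ++ [m], p.2)) p
    = (p.1 ++ l.filter (fun m => !(PySem.Set.contains cset m)),
       p.2 ++ l.filter (fun m => PySem.Set.contains cset m)) := by
  induction l generalizing p with
  | nil => simp
  | cons x xs ih =>
    rw [List.foldl_cons, ih]
    by_cases hm : x ∈ cset <;>
      simp [PySem.Set.contains, hm]

theorem contains_ofList (xs : List String) (m : String) :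
    PySem.Set.contains (PySem.Set.ofList xs) m = xs.contains m := by
  by_cases h : m ∈ xs <;>
    simp [PySem.Set.contains, PySem.Set.mem_ofList, h]

theorem normB_eq : (fun m => if is_wwn_b m then PySem.Str.lower m else m) = pvNorm := by
  funext m
  simp [pvNorm, is_wwn, is_wwn_b]

theorem process_member_diff_eq (result : List (String × String)) (members : List String) (c : List String) :
    process_member_diff result members c = process_member_diff_alt result members c := by
  simp only [process_member_diff, process_member_diff_alt]
  rw [normB_eq]
  rw [foldl_pick, foldl_remove, foldl_pair]
  simp only [contains_ofList, List.nil_append]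
  refine congrArg₂ Prod.mk rfl (congrArg₂ Prod.mk ?_ ?_)
  · apply List.filter_congr
    intro m _
    simp
  · have h3 := foldl_pick (List.filter (fun m => !c.contains m) (List.map pvNorm members)) members []
    rw [List.nil_append] at h3
    refine h3.trans ?_
    apply List.filter_congr
    intro m hm
    by_cases h : m ∈ c
    · have hin : m ∈ List.filter (fun m => !c.contains m) (List.map pvNorm members) → False := by
        simp [List.mem_filter, h]
      simp [h, hin]
    · have hin : m ∈ List.filter (fun m => !c.contains m) (List.map pvNorm members) := by
        simp [List.mem_filter, h, hm]
      simp [h, hin]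
      simpa using hm

-- ===== VERDICT (by name: the statement is the Claim_ definition above) =====
theorem process_member_diff_spec : Claim_equal_process_member_diff := by
  intro result members current_members _
  exact process_member_diff_eq result members current_members
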